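-- pv_equiv track=rewrite | github.com/DongYun666/leetcode | 2100. 适合打劫银行的日子.py | goodDaysToRobBank2
-- ===== SOURCE A (Python) =====
-- from typing import List
--
-- def goodDaysToRobBank2(security: List[int], time: int) -> List[int]:
--     n = len(security)
--     ans = []
--     left,right = [0]*n,[0]*n
--     for i in range(1,n):
--         if security[i] <=security[i-1]:
--             left[i] = left[i-1]+1
--     for i in range(n-2,-1,-1):
--         if security[i] <= security[i+1]:
--             right[i] = right[i+1] +1
--     for i in range(time,n-time):
--         if left[i]>=time and right[i]>=time:
--             ans.append(i)
--     return ans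
-- ===== SOURCE B (Python) =====
-- from typing import List
--
-- def goodDaysToRobBank2(security: List[int], time: int) -> List[int]:
--     n = len(security)
--     dec = [0] * n          # dec[k] = length of non-increasing streak ending at k
--     inc = 0                # length of non-decreasing streak ending at current k
--     ans = []
--     for k in range(n):
--         if k > 0:
--             dec[k] = dec[k - 1] + 1 if security[k] <= security[k - 1] else 0
--             inc = inc + 1 if security[k - 1] <= security[k] else 0
--         if k >= 2 * time and inc >= time and dec[k - time] >= time:
--             ans.append(k - time)
--     return ans
-- ===== Notes on version B (the rewrite author's own statement) =====
-- stated objective: simpler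
-- what changed: Replaces A's three separate passes (left array, right suffix array, final scan) by a single forward pass that keeps a non-increasing-streak array and a running non-decreasing-streak counter and emits good day k-time on the fly via the lag-time relationship, so the suffix array and the final scan disappear.
import Mathlib
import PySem

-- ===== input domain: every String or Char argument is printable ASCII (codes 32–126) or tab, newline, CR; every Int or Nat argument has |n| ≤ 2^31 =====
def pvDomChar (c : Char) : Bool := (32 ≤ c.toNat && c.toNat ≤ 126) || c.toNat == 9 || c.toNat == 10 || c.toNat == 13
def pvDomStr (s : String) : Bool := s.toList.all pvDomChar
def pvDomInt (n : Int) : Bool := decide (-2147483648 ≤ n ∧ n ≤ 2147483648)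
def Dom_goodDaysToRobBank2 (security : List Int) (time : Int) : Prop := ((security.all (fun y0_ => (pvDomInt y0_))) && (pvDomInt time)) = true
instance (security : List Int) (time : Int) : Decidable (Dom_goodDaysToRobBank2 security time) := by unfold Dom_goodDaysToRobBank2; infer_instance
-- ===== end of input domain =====

-- B replaces A's three passes (prefix array, suffix array, final scan) by one forward pass that
-- emits each good day k - time on the fly; same output, objective: simpler decomposition.

-- ===== PORT A =====
def goodDaysToRobBank2 (security : List Int) (time : Int) : List Int :=
  let n : Int := (security.length : Int)
  let left := (PySem.List.pyRange 1 n 1).foldl (fun l i =>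
      if PySem.List.pyGetD security i 0 ≤ PySem.List.pyGetD security (i - 1) 0 then
        PySem.List.pySetD l i (PySem.List.pyGetD l (i - 1) 0 + 1)
      else l) (List.replicate security.length (0 : Int))
  let right := (PySem.List.pyRange (n - 2) (-1) (-1)).foldl (fun r i =>
      if PySem.List.pyGetD security i 0 ≤ PySem.List.pyGetD security (i + 1) 0 then
        PySem.List.pySetD r i (PySem.List.pyGetD r (i + 1) 0 + 1)
      else r) (List.replicate security.length (0 : Int))
  (PySem.List.pyRange time (n - time) 1).foldl (fun ans i =>
      if time ≤ PySem.List.pyGetD left i 0 ∧ time ≤ PySem.List.pyGetD right i 0 then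
        ans ++ [i]
      else ans) []

-- ===== PORT B =====
def goodDaysToRobBank2_alt (security : List Int) (time : Int) : List Int :=
  let n : Int := (security.length : Int)
  let st := (PySem.List.pyRange 0 n 1).foldl
    (fun (st : List Int × Int × List Int) k =>
      let dec := if 0 < k then
          (if PySem.List.pyGetD security k 0 ≤ PySem.List.pyGetD security (k - 1) 0 then
            PySem.List.pySetD st.1 k (PySem.List.pyGetD st.1 (k - 1) 0 + 1)
          else PySem.List.pySetD st.1 k 0)
        else st.1
      let inc := if 0 < k then
          (if PySem.List.pyGetD security (k - 1) 0 ≤ PySem.List.pyGetD security k 0 then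
            st.2.1 + 1
          else 0)
        else st.2.1
      let ans := if 2 * time ≤ k ∧ time ≤ inc ∧ time ≤ PySem.List.pyGetD dec (k - time) 0 then
          st.2.2 ++ [k - time]
        else st.2.2
      (dec, inc, ans))
    (List.replicate security.length (0 : Int), (0 : Int), ([] : List Int))
  st.2.2

-- ===== PRECONDITION & SPEC =====
-- Pre_ excludes time < 0, on which A always raises IndexError (its final range walks past the end of left).
def Pre_goodDaysToRobBank2 (security : List Int) (time : Int) : Prop := 0 ≤ time
instance (security : List Int) (time : Int) : Decidable (Pre_goodDaysToRobBank2 security time) := by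
  unfold Pre_goodDaysToRobBank2; infer_instance

def pvWitness_goodDaysToRobBank2 : List Int × Int := ([5, 3, 3, 3, 5, 6, 2], 2)

def Spec_goodDaysToRobBank2 (security : List Int) (time : Int) (out : List Int) : Prop :=
  out = goodDaysToRobBank2_alt security time
instance (security : List Int) (time : Int) (out : List Int) : Decidable (Spec_goodDaysToRobBank2 security time out) := by
  unfold Spec_goodDaysToRobBank2; infer_instance

-- ===== CLAIM (what is proved, stated in full; the proofs are below) =====
def Claim_equal_goodDaysToRobBank2 : Prop := ∀ (security : List Int) (time : Int), Dom_goodDaysToRobBank2 security time → Pre_goodDaysToRobBank2 security time → Spec_goodDaysToRobBank2 security time (goodDaysToRobBank2 security time)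

-- ===== LEMMAS AND PROOFS =====

-- dec[j] / left[j]: length of the non-increasing streak ending at j
def Lstreak (s : List Int) : Nat → Int
  | 0 => 0
  | j + 1 => if s.getD (j + 1) 0 ≤ s.getD j 0 then Lstreak s j + 1 else 0

-- right[j]: length of the non-decreasing streak starting at j
def Rstreak (s : List Int) (j : Nat) : Int :=
  if h : j + 1 < s.length then
    (if s.getD j 0 ≤ s.getD (j + 1) 0 then Rstreak s (j + 1) + 1 else 0)
  else 0
termination_by s.length - j

theorem Rstreak_nonneg (s : List Int) (j : Nat) : 0 ≤ Rstreak s j := by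
  rw [Rstreak]
  split
  · split
    · have := Rstreak_nonneg s (j + 1); omega
    · omega
  · omega
termination_by s.length - j

-- inc at k: length of the non-decreasing streak ending at k
def Istreak (s : List Int) : Nat → Int
  | 0 => 0
  | k + 1 => if s.getD k 0 ≤ s.getD (k + 1) 0 then Istreak s k + 1 else 0

theorem Istreak_nonneg (s : List Int) (k : Nat) : 0 ≤ Istreak s k := by
  induction k with
  | zero => simp [Istreak]
  | succ k ih => simp only [Istreak]; split <;> omega

theorem Rstreak_ge_iff (s : List Int) (tn i : Nat) (h : i + tn < s.length) :
    ((tn : Int) ≤ Rstreak s i ↔ ∀ d < tn, s.getD (i + d) 0 ≤ s.getD (i + d + 1) 0) := by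
  induction tn generalizing i with
  | zero => simpa using Rstreak_nonneg s i
  | succ tn ih =>
    rw [Rstreak, dif_pos (by omega)]
    by_cases hc : s.getD i 0 ≤ s.getD (i + 1) 0
    · rw [if_pos hc]
      have hih := ih (i + 1) (by omega)
      constructor
      · intro hle d hd
        rcases Nat.eq_zero_or_pos d with rfl | hdp
        · simpa using hc
        · have := (hih.1 (by push_cast at hle ⊢; omega)) (d - 1) (by omega)
          have he : i + 1 + (d - 1) = i + d := by omega
          rw [he] at this
          have he2 : i + (d - 1) + 1 = i + d := by omega
          exact this
      · intro hall
        have : (tn : Int) ≤ Rstreak s (i + 1) := by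
          refine hih.2 ?_
          intro d hd
          have := hall (d + 1) (by omega)
          have he : i + (d + 1) = i + 1 + d := by omega
          rwa [he] at this
        push_cast; omega
    · rw [if_neg hc]
      constructor
      · intro hle; exfalso; push_cast at hle; omega
      · intro hall; exact absurd (by simpa using hall 0 (by omega)) hc

theorem Istreak_ge_iff (s : List Int) (tn k : Nat) (h : tn ≤ k) :
    ((tn : Int) ≤ Istreak s k ↔ ∀ d < tn, s.getD (k - 1 - d) 0 ≤ s.getD (k - d) 0) := by
  induction tn generalizing k with
  | zero => simpa using Istreak_nonneg s k
  | succ tn ih =>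
    obtain ⟨k', rfl⟩ : ∃ k', k = k' + 1 := ⟨k - 1, by omega⟩
    rw [show Istreak s (k' + 1) = if s.getD k' 0 ≤ s.getD (k' + 1) 0 then Istreak s k' + 1 else 0 from rfl]
    by_cases hc : s.getD k' 0 ≤ s.getD (k' + 1) 0
    · rw [if_pos hc]
      have hih := ih k' (by omega)
      constructor
      · intro hle d hd
        rcases Nat.eq_zero_or_pos d with rfl | hdp
        · simpa using hc
        · have := (hih.1 (by push_cast at hle ⊢; omega)) (d - 1) (by omega)
          have he : k' - 1 - (d - 1) = k' + 1 - 1 - d := by omega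
          have he2 : k' - (d - 1) = k' + 1 - d := by omega
          rwa [he, he2] at this
      · intro hall
        have : (tn : Int) ≤ Istreak s k' := by
          refine hih.2 ?_
          intro d hd
          have := hall (d + 1) (by omega)
          have he : k' + 1 - 1 - (d + 1) = k' - 1 - d := by omega
          have he2 : k' + 1 - (d + 1) = k' - d := by omega
          rwa [he, he2] at this
        push_cast; omega
    · rw [if_neg hc]
      constructor
      · intro hle; exfalso; push_cast at hle; omega
      · intro hall; exact absurd (by simpa using hall 0 (by omega)) hc

theorem R_iff_I (s : List Int) (tn i : Nat) (h : i + tn < s.length) :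
    ((tn : Int) ≤ Rstreak s i ↔ (tn : Int) ≤ Istreak s (i + tn)) := by
  rw [Rstreak_ge_iff s tn i h, Istreak_ge_iff s tn (i + tn) (by omega)]
  constructor
  · intro hall d hd
    have := hall (tn - 1 - d) (by omega)
    rw [show i + tn - d = i + tn - 1 - d + 1 from by omega]
    rwa [show i + (tn - 1 - d) = i + tn - 1 - d from by omega] at this
  · intro hall d hd
    have := hall (tn - 1 - d) (by omega)
    have he : i + tn - 1 - (tn - 1 - d) = i + d := by omega
    have he2 : i + tn - (tn - 1 - d) = i + d + 1 := by omega
    rwa [he, he2] at this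

theorem set_map_range (f : Nat → Int) (n m : Nat) (v : Int) :
    ((List.range n).map f).set m v = (List.range n).map (fun j => if j = m then v else f j) := by
  apply List.ext_getElem
  · simp
  · intro j h1 h2
    simp only [List.getElem_set, List.getElem_map, List.getElem_range]
    rcases eq_or_ne j m with h | h
    · simp [h]
    · simp [h, Ne.symm h]

theorem getD_map_range_lt (f : Nat → Int) (n j : Nat) (hj : j < n) :
    ((List.range n).map f).getD j 0 = f j := by
  rw [List.getD_eq_getElem _ _ (by simpa using hj)]; simp

theorem map_range_congr (f g : Nat → Int) (n : Nat) (h : ∀ j < n, f j = g j) :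
    (List.range n).map f = (List.range n).map g := by
  apply List.map_congr_left; simpa using h

theorem replicate_eq_map_range (n : Nat) (f : Nat → Int) (h : ∀ j < n, f j = 0) :
    List.replicate n (0 : Int) = (List.range n).map f := by
  apply List.ext_getElem
  · simp
  · intro j h1 h2
    simp only [List.getElem_replicate, List.getElem_map, List.getElem_range]
    exact (h j (by simpa using h2)).symm

theorem leftA (s : List Int) (m : Nat) (hm : m ≤ s.length) :
    (PySem.List.pyRange 1 (m : Int) 1).foldl (fun l i =>
      if PySem.List.pyGetD s i 0 ≤ PySem.List.pyGetD s (i - 1) 0 then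
        PySem.List.pySetD l i (PySem.List.pyGetD l (i - 1) 0 + 1)
      else l) (List.replicate s.length (0 : Int))
    = (List.range s.length).map (fun j => if j < m then Lstreak s j else 0) := by
  induction m with
  | zero =>
    rw [PySem.List.pyRange_one_eq_nil (by omega)]
    simp only [List.foldl_nil]
    exact replicate_eq_map_range _ _ (by intro j hj; simp)
  | succ m ih =>
    rcases Nat.eq_zero_or_pos m with rfl | hmp
    · rw [PySem.List.pyRange_one_eq_nil (by omega)]
      simp only [List.foldl_nil]
      refine replicate_eq_map_range _ _ ?_
      intro j hj
      rcases Nat.eq_zero_or_pos j with rfl | hjp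
      · simp [Lstreak]
      · simp [show ¬ j < 1 by omega]
    · rw [show ((m + 1 : Nat) : Int) = (m : Int) + 1 from by push_cast; ring,
        PySem.List.pyRange_one_succ_right (by omega), List.foldl_append, ih (by omega)]
      simp only [List.foldl_cons, List.foldl_nil]
      have hg1 : PySem.List.pyGetD s (m : Int) 0 = s.getD m 0 := by
        simp [PySem.List.pyGetD_natCast]
      have hg2 : PySem.List.pyGetD s ((m : Int) - 1) 0 = s.getD (m - 1) 0 := by
        rw [show (m : Int) - 1 = ((m - 1 : Nat) : Int) from by omega]
        simp [PySem.List.pyGetD_natCast]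
      rw [hg1, hg2]
      by_cases hc : s.getD m 0 ≤ s.getD (m - 1) 0
      · rw [if_pos hc]
        rw [show (m : Int) - 1 = ((m - 1 : Nat) : Int) from by omega]
        rw [PySem.List.pyGetD_natCast, PySem.List.pySetD_natCast]
        rw [getD_map_range_lt _ _ _ (by omega), set_map_range]
        refine map_range_congr _ _ _ ?_
        intro j hj
        rcases eq_or_ne j m with rfl | hne
        · have : Lstreak s j = if s.getD j 0 ≤ s.getD (j - 1) 0 then Lstreak s (j - 1) + 1 else 0 := by
            obtain ⟨j', rfl⟩ : ∃ j', j = j' + 1 := ⟨j - 1, by omega⟩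
            simp [Lstreak]
          rw [this, if_pos hc]
          simp [show j - 1 < j by omega]
        · by_cases hjm : j < m <;> simp [hne, hjm] <;> omega
      · rw [if_neg hc]
        refine map_range_congr _ _ _ ?_
        intro j hj
        rcases eq_or_ne j m with rfl | hne
        · have : Lstreak s j = 0 := by
            obtain ⟨j', rfl⟩ : ∃ j', j = j' + 1 := ⟨j - 1, by omega⟩
            simp only [Lstreak]
            rw [if_neg (by simpa using hc)]
          simp [this]
        · by_cases hjm : j < m <;> simp [hjm] <;> omega

theorem rightA (s : List Int) (m : Nat) (hm : m + 1 ≤ s.length) :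
    (PySem.List.pyRange ((m : Int) - 1) (-1) (-1)).foldl (fun r i =>
      if PySem.List.pyGetD s i 0 ≤ PySem.List.pyGetD s (i + 1) 0 then
        PySem.List.pySetD r i (PySem.List.pyGetD r (i + 1) 0 + 1)
      else r) ((List.range s.length).map (fun j => if m ≤ j then Rstreak s j else 0))
    = (List.range s.length).map (fun j => Rstreak s j) := by
  induction m with
  | zero =>
    rw [PySem.List.pyRange_neg_one_eq_nil (by omega)]
    simp
  | succ m ih =>
    rw [show ((m + 1 : Nat) : Int) - 1 = (m : Int) from by push_cast; ring,
      PySem.List.pyRange_neg_one_cons (by omega), List.foldl_cons]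
    have hstep :
        (if PySem.List.pyGetD s (m : Int) 0 ≤ PySem.List.pyGetD s ((m : Int) + 1) 0 then
          PySem.List.pySetD ((List.range s.length).map (fun j => if m + 1 ≤ j then Rstreak s j else 0)) (m : Int)
            (PySem.List.pyGetD ((List.range s.length).map (fun j => if m + 1 ≤ j then Rstreak s j else 0)) ((m : Int) + 1) 0 + 1)
        else ((List.range s.length).map (fun j => if m + 1 ≤ j then Rstreak s j else 0)))
        = (List.range s.length).map (fun j => if m ≤ j then Rstreak s j else 0) := by
      have hg1 : PySem.List.pyGetD s (m : Int) 0 = s.getD m 0 := by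
        simp [PySem.List.pyGetD_natCast]
      have hg2 : PySem.List.pyGetD s ((m : Int) + 1) 0 = s.getD (m + 1) 0 := by
        rw [show (m : Int) + 1 = ((m + 1 : Nat) : Int) from by push_cast; ring,
          PySem.List.pyGetD_natCast]
      rw [hg1, hg2]
      have hRm : Rstreak s m = if s.getD m 0 ≤ s.getD (m + 1) 0 then Rstreak s (m + 1) + 1 else 0 := by
        rw [Rstreak, dif_pos (by omega)]
      by_cases hc : s.getD m 0 ≤ s.getD (m + 1) 0
      · rw [if_pos hc]
        rw [show (m : Int) + 1 = ((m + 1 : Nat) : Int) from by push_cast; ring,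
          PySem.List.pyGetD_natCast, PySem.List.pySetD_natCast,
          getD_map_range_lt _ _ _ (by omega), set_map_range]
        refine map_range_congr _ _ _ ?_
        intro j hj
        rcases eq_or_ne j m with rfl | hne
        · rw [if_pos rfl, if_pos (le_refl (j + 1)), if_pos (le_refl j), hRm, if_pos hc]
        · by_cases hjm : m + 1 ≤ j
          · simp [hne, hjm, show m ≤ j by omega]
          · simp [hne, hjm, show ¬ m ≤ j by omega]
      · rw [if_neg hc]
        refine map_range_congr _ _ _ ?_
        intro j hj
        rcases eq_or_ne j m with rfl | hne
        · rw [if_neg (show ¬ j + 1 ≤ j by omega), if_pos (le_refl j), hRm, if_neg hc]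
        · by_cases hjm : m + 1 ≤ j
          · simp [hjm, show m ≤ j by omega]
          · simp [hjm, show ¬ m ≤ j by omega]
    rw [hstep]
    exact ih (by omega)

theorem range_shift (a n : Nat) :
    PySem.List.pyRange (a : Int) ((n : Int) - (a : Int)) 1
    = ((List.range n).filter (fun k => decide (2 * a ≤ k))).map (fun (k : Nat) => (k : Int) - (a : Int)) := by
  induction n with
  | zero =>
    rw [PySem.List.pyRange_one_eq_nil (by omega)]
    simp
  | succ n ih =>
    rw [List.range_succ, List.filter_append, List.map_append]
    by_cases h : 2 * a ≤ n
    · rw [show ((n + 1 : Nat) : Int) - (a : Int) = ((n : Int) - a) + 1 from by push_cast; ring,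
        PySem.List.pyRange_one_succ_right (by omega), ih]
      simp [h]
    · rw [PySem.List.pyRange_one_eq_nil (by push_cast; omega)]
      rw [PySem.List.pyRange_one_eq_nil (by omega)] at ih
      simp [h, ← ih]


-- B's single pass
theorem altB (s : List Int) (t : Int) (ht : 0 ≤ t) (m : Nat) (hm : m ≤ s.length) :
    (PySem.List.pyRange 0 (m : Int) 1).foldl
    (fun (st : List Int × Int × List Int) k =>
      let dec := if 0 < k then
          (if PySem.List.pyGetD s k 0 ≤ PySem.List.pyGetD s (k - 1) 0 then
            PySem.List.pySetD st.1 k (PySem.List.pyGetD st.1 (k - 1) 0 + 1)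
          else PySem.List.pySetD st.1 k 0)
        else st.1
      let inc := if 0 < k then
          (if PySem.List.pyGetD s (k - 1) 0 ≤ PySem.List.pyGetD s k 0 then
            st.2.1 + 1
          else 0)
        else st.2.1
      let ans := if 2 * t ≤ k ∧ t ≤ inc ∧ t ≤ PySem.List.pyGetD dec (k - t) 0 then
          st.2.2 ++ [k - t]
        else st.2.2
      (dec, inc, ans))
    (List.replicate s.length (0 : Int), (0 : Int), ([] : List Int))
    = ((List.range s.length).map (fun j => if j < m then Lstreak s j else 0),
       Istreak s (m - 1),
       ((List.range m).filter (fun (k : Nat) => decide (2 * t ≤ (k : Int) ∧ t ≤ Istreak s k ∧ t ≤ Lstreak s (k - t.toNat)))).map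
         (fun (k : Nat) => (k : Int) - t)) := by
  induction m with
  | zero =>
    rw [PySem.List.pyRange_one_eq_nil (by omega)]
    simp only [List.foldl_nil, List.range_zero, List.filter_nil, List.map_nil]
    refine Prod.ext ?_ (Prod.ext rfl rfl)
    exact replicate_eq_map_range _ _ (by intro j hj; simp)
  | succ m ih =>
    rw [show ((m + 1 : Nat) : Int) = (m : Int) + 1 from by push_cast; ring,
      PySem.List.pyRange_one_succ_right (by omega), List.foldl_append, ih (by omega)]
    simp only [List.foldl_cons, List.foldl_nil]
    have hdec : (if 0 < (m : Int) then
          (if PySem.List.pyGetD s (m : Int) 0 ≤ PySem.List.pyGetD s ((m : Int) - 1) 0 then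
            PySem.List.pySetD ((List.range s.length).map (fun j => if j < m then Lstreak s j else 0)) (m : Int)
              (PySem.List.pyGetD ((List.range s.length).map (fun j => if j < m then Lstreak s j else 0)) ((m : Int) - 1) 0 + 1)
          else PySem.List.pySetD ((List.range s.length).map (fun j => if j < m then Lstreak s j else 0)) (m : Int) 0)
        else (List.range s.length).map (fun j => if j < m then Lstreak s j else 0))
        = (List.range s.length).map (fun j => if j < m + 1 then Lstreak s j else 0) := by
      rcases Nat.eq_zero_or_pos m with rfl | hmp
      · rw [if_neg (by omega)]
        refine map_range_congr _ _ _ ?_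
        intro j hj
        rcases Nat.eq_zero_or_pos j with rfl | hj0
        · simp [Lstreak]
        · simp [show ¬ j < 0 by omega, show ¬ j < 1 by omega]
      · rw [if_pos (by exact_mod_cast hmp)]
        rw [show (m : Int) - 1 = ((m - 1 : Nat) : Int) from by omega]
        simp only [PySem.List.pyGetD_natCast, PySem.List.pySetD_natCast]
        rw [getD_map_range_lt _ _ _ (by omega), if_pos (show m - 1 < m by omega)]
        by_cases hc : s.getD m 0 ≤ s.getD (m - 1) 0
        · rw [if_pos hc, set_map_range]
          refine map_range_congr _ _ _ ?_
          intro j hj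
          rcases eq_or_ne j m with rfl | hne
          · have hL : Lstreak s j = if s.getD j 0 ≤ s.getD (j - 1) 0 then Lstreak s (j - 1) + 1 else 0 := by
              obtain ⟨j', rfl⟩ : ∃ j', j = j' + 1 := ⟨j - 1, by omega⟩
              simp [Lstreak]
            rw [if_pos rfl, if_pos (show j < j + 1 by omega), hL, if_pos hc]
          · by_cases hjm : j < m
            · simp [hne, hjm, show j < m + 1 by omega]
            · simp [hne, hjm, show ¬ j < m + 1 by omega]
        · rw [if_neg hc, set_map_range]
          refine map_range_congr _ _ _ ?_
          intro j hj
          rcases eq_or_ne j m with rfl | hne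
          · have hL : Lstreak s j = 0 := by
              obtain ⟨j', rfl⟩ : ∃ j', j = j' + 1 := ⟨j - 1, by omega⟩
              simp only [Lstreak]
              rw [if_neg (by simpa using hc)]
            rw [if_pos rfl, if_pos (show j < j + 1 by omega), hL]
          · by_cases hjm : j < m
            · simp [hne, hjm, show j < m + 1 by omega]
            · simp [hne, hjm, show ¬ j < m + 1 by omega]
    have hinc : (if 0 < (m : Int) then
          (if PySem.List.pyGetD s ((m : Int) - 1) 0 ≤ PySem.List.pyGetD s (m : Int) 0 then Istreak s (m - 1) + 1 else 0)
        else Istreak s (m - 1)) = Istreak s m := by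
      rcases Nat.eq_zero_or_pos m with rfl | hmp
      · rw [if_neg (by omega)]
      · obtain ⟨m', rfl⟩ : ∃ m', m = m' + 1 := ⟨m - 1, by omega⟩
        rw [if_pos (by exact_mod_cast hmp)]
        rw [show ((m' + 1 : Nat) : Int) - 1 = ((m' : Nat) : Int) from by push_cast; ring]
        simp only [PySem.List.pyGetD_natCast, Nat.add_sub_cancel]
        simp [Istreak]
    rw [hdec, hinc]
    refine Prod.ext rfl (Prod.ext (by simp) ?_)
    simp only []
    rw [List.range_succ, List.filter_append, List.map_append, List.filter_cons, List.filter_nil]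
    by_cases h2 : 2 * t ≤ (m : Int)
    · have hgd : PySem.List.pyGetD ((List.range s.length).map (fun j => if j < m + 1 then Lstreak s j else 0)) ((m : Int) - t) 0 = Lstreak s (m - t.toNat) := by
        rw [show (m : Int) - t = ((m - t.toNat : Nat) : Int) from by omega,
          PySem.List.pyGetD_natCast, getD_map_range_lt _ _ _ (by omega), if_pos (by omega)]
      rw [hgd]
      by_cases hrest : t ≤ Istreak s m ∧ t ≤ Lstreak s (m - t.toNat)
      · have hall : 2 * t ≤ (m : Int) ∧ t ≤ Istreak s m ∧ t ≤ Lstreak s (m - t.toNat) := ⟨h2, hrest.1, hrest.2⟩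
        rw [if_pos hall]
        simp [hall]
      · have hnall : ¬ (2 * t ≤ (m : Int) ∧ t ≤ Istreak s m ∧ t ≤ Lstreak s (m - t.toNat)) := by tauto
        rw [if_neg hnall]
        simp [hnall]
    · have hnall : ¬ (2 * t ≤ (m : Int) ∧ t ≤ Istreak s m ∧ t ≤ Lstreak s (m - t.toNat)) := by tauto
      rw [if_neg (by tauto)]
      simp [hnall]

theorem altB_out (s : List Int) (t : Int) (ht : 0 ≤ t) :
    goodDaysToRobBank2_alt s t
    = ((List.range s.length).filter (fun (k : Nat) => decide (2 * t ≤ (k : Int) ∧ t ≤ Istreak s k ∧ t ≤ Lstreak s (k - t.toNat)))).map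
        (fun (k : Nat) => (k : Int) - t) := by
  exact congrArg (fun p : List Int × Int × List Int => p.2.2) (altB s t ht s.length le_rfl)

theorem a_out (s : List Int) (t : Int) (ht : 0 ≤ t) :
    goodDaysToRobBank2 s t
    = ((List.range s.length).filter (fun (k : Nat) => decide (2 * t ≤ (k : Int) ∧ t ≤ Istreak s k ∧ t ≤ Lstreak s (k - t.toNat)))).map
        (fun (k : Nat) => (k : Int) - t) := by
  show (PySem.List.pyRange t ((s.length : Int) - t) 1).foldl _ [] = _
  rw [leftA s s.length le_rfl]
  rcases Nat.eq_zero_or_pos s.length with hn | hn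
  · rw [PySem.List.pyRange_one_eq_nil (by omega), hn]
    simp
  · rw [show (s.length : Int) - 2 = ((s.length - 1 : Nat) : Int) - 1 from by omega,
      replicate_eq_map_range s.length (fun j => if s.length - 1 ≤ j then Rstreak s j else 0)
        (by intro j hj
            dsimp only
            by_cases h : s.length - 1 ≤ j
            · rw [if_pos h, show j = s.length - 1 from by omega, Rstreak, dif_neg (by omega)]
            · rw [if_neg h]),
      rightA s (s.length - 1) (by omega)]
    rw [PySem.List.foldl_append_ite_eq_filter, List.nil_append]
    rw [show t = ((t.toNat : Nat) : Int) from by omega, range_shift t.toNat s.length,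
      List.filter_map, List.filter_filter]
    refine congrArg _ (List.filter_congr ?_)
    intro k hk
    have hkn : k < s.length := by simpa using hk
    by_cases h2 : 2 * t.toNat ≤ k
    · have hshift : ((k : Int)) - ((t.toNat : Nat) : Int) = (((k - t.toNat : Nat)) : Int) := by omega
      have hidx : k - t.toNat < s.length := by omega
      have hgl : PySem.List.pyGetD ((List.range s.length).map (fun j => if j < s.length then Lstreak s j else 0)) ((k : Int) - ((t.toNat : Nat) : Int)) 0 = Lstreak s (k - t.toNat) := by
        rw [hshift, PySem.List.pyGetD_natCast, getD_map_range_lt _ _ _ hidx, if_pos hidx]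
      have hgr : PySem.List.pyGetD ((List.range s.length).map (fun j => Rstreak s j)) ((k : Int) - ((t.toNat : Nat) : Int)) 0 = Rstreak s (k - t.toNat) := by
        rw [hshift, PySem.List.pyGetD_natCast, getD_map_range_lt _ _ _ hidx]
      have hri := R_iff_I s t.toNat (k - t.toNat) (by omega)
      rw [show k - t.toNat + t.toNat = k from by omega] at hri
      simp only [Function.comp_apply, hgl, hgr]
      rw [← Bool.decide_and]
      refine decide_eq_decide.mpr ?_
      constructor
      · rintro ⟨⟨hl, hr⟩, h2k⟩
        exact ⟨by omega, hri.1 hr, hl⟩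
      · rintro ⟨h2k, hi, hl⟩
        exact ⟨⟨hl, hri.2 hi⟩, by omega⟩
    · simp only [Function.comp_apply]
      simp [h2]
      intros
      omega

theorem goodDaysToRobBank2_spec : Claim_equal_goodDaysToRobBank2 := by
  intro s t _ hpre
  have ht : 0 ≤ t := hpre
  unfold Spec_goodDaysToRobBank2
  rw [a_out s t ht, altB_out s t ht]
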